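-- pv_equiv track=rewrite | github.com/spartan8806/model-clinic | src/model_clinic/_tools/xray.py | group_params
-- ===== SOURCE A (Python) =====
-- from collections import defaultdict
--
-- def group_params(all_stats):
--     """Group params by module prefix."""
--     groups = defaultdict(list)
--     for s in all_stats:
--         parts = s["name"].split(".")
--         if len(parts) >= 3:
--             group = ".".join(parts[:3])
--         elif len(parts) >= 2:
--             group = ".".join(parts[:2])
--         else:
--             group = parts[0]
--         groups[group].append(s)
--     return dict(groups)
-- ===== SOURCE B (Python) =====
-- def _key(s):
--     return ".".join(s["name"].split(".")[:3])
--
-- def group_params(all_stats):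
--     """Group params by module prefix: ordered distinct keys, then one filter per key."""
--     keys = []
--     for s in all_stats:
--         k = _key(s)
--         if k not in keys:
--             keys.append(k)
--     return {k: [s for s in all_stats if _key(s) == k] for k in keys}
-- ===== Notes on version B (the rewrite author's own statement) =====
-- stated objective: alternative
-- what changed: B replaces A's single defaultdict-append pass (with a three-way branch on the number of name parts) by computing a uniform '.'-join-of-first-3-parts key, collecting the ordered distinct keys, and building each group with one filter pass over the input per key.
import Mathlib
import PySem

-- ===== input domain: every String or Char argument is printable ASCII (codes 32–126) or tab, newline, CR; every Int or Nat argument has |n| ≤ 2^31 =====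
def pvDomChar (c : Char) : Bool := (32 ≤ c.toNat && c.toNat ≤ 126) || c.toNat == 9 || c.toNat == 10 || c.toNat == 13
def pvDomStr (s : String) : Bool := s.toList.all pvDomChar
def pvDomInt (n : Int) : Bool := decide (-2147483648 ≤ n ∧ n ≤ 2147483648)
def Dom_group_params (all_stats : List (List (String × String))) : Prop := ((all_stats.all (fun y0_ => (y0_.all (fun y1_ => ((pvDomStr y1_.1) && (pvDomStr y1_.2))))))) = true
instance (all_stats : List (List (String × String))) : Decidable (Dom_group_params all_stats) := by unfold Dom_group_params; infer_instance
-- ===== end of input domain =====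

-- B groups by computing the ordered distinct keys once and filtering the input per key,
-- instead of A's defaultdict-append loop (objective: alternative decomposition, not faster).
-- Proved about the RETURN value; neither version mutates its argument.

-- s["name"]: first-match association-list lookup; Pre_ guarantees the key is present,
-- so the "" default is never reached on admitted inputs (A raises KeyError otherwise).
def pvNameOf (s : List (String × String)) : String :=
  ((s.find? (fun p => p.1 == "name")).map (·.2)).getD ""

-- ===== PORT A =====
def pvKeyA (name : String) : String :=
  let parts := (PySem.Str.split? name ".").getD []   -- sep "." ≠ "", so split? is some
  if 3 ≤ parts.length then PySem.Str.join "." (parts.take 3)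
  else if 2 ≤ parts.length then PySem.Str.join "." (parts.take 2)
  else PySem.List.pyGetD parts 0 ""

def group_params (all_stats : List (List (String × String))) : List (String × List (List (String × String))) :=
  (all_stats.foldl
    (fun (g : PySem.Dict String (List (List (String × String)))) s =>
      g.modify (pvKeyA (pvNameOf s)) [] (· ++ [s]))
    PySem.Dict.empty).items

-- ===== PORT B =====
def pvKeyB (s : List (String × String)) : String :=
  PySem.Str.join "." (((PySem.Str.split? (pvNameOf s) ".").getD []).take 3)

def group_params_alt (all_stats : List (List (String × String))) : List (String × List (List (String × String))) :=
  let keys : PySem.Set String :=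
    all_stats.foldl (fun ks s => PySem.Set.add ks (pvKeyB s)) PySem.Set.empty
  keys.map (fun k => (k, all_stats.filter (fun s => pvKeyB s == k)))

-- ===== PRECONDITION & SPEC =====
-- Pre_ excludes exactly the stats dicts without a "name" key, on which A raises KeyError.
def Pre_group_params (all_stats : List (List (String × String))) : Prop :=
  (all_stats.all (fun s => s.any (fun p => p.1 == "name"))) = true
instance (all_stats : List (List (String × String))) : Decidable (Pre_group_params all_stats) := by unfold Pre_group_params; infer_instance
def pvWitness_group_params : (List (List (String × String))) :=
  [[("name", "net.layer1.conv.weight"), ("shape", "3x3")], [("name", "bias")], [("name", "enc.fc")]]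

def Spec_group_params (all_stats : List (List (String × String))) (out : List (String × List (List (String × String)))) : Prop := out = group_params_alt all_stats
instance (all_stats : List (List (String × String))) (out : List (String × List (List (String × String)))) : Decidable (Spec_group_params all_stats out) := by unfold Spec_group_params; infer_instance

-- ===== CLAIM (what is proved, stated in full; the proofs are below) =====
def Claim_equal_group_params : Prop := ∀ (all_stats : List (List (String × String))), Dom_group_params all_stats → Pre_group_params all_stats → Spec_group_params all_stats (group_params all_stats)

-- ===== LEMMAS AND PROOFS =====

lemma splitOn_go_ne_nil (sep : List Char) :
    ∀ (fuel : Nat) (l cur : List Char) (acc : List (List Char)),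
      PySem.Chars.splitOn.go sep fuel l cur acc ≠ [] := by
  intro fuel
  induction fuel with
  | zero => intro l cur acc; simp [PySem.Chars.splitOn.go]
  | succ n ih =>
      intro l cur acc
      cases l with
      | nil => simp [PySem.Chars.splitOn.go]
      | cons c rest =>
          rw [PySem.Chars.splitOn.go]
          split
          · exact ih _ _ _
          · exact ih _ _ _

lemma splitOn_ne_nil (s sep : List Char) : PySem.Chars.splitOn s sep ≠ [] := by
  unfold PySem.Chars.splitOn; exact splitOn_go_ne_nil _ _ _ _ _

-- the two key computations agree on every stats dict
lemma key_eq (s : List (String × String)) : pvKeyA (pvNameOf s) = pvKeyB s := by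
  unfold pvKeyA pvKeyB PySem.Str.split?
  simp only [PySem.Chars.split?, show (".".toList.isEmpty) = false from rfl,
    Bool.false_eq_true, if_false, Option.map_some, Option.getD_some]
  generalize hg : PySem.Chars.splitOn (pvNameOf s).toList ".".toList = ps
  have hne : ps ≠ [] := hg ▸ splitOn_ne_nil _ _
  match ps, hne with
  | [a], _ =>
      simp [PySem.List.pyGetD, PySem.List.pyGet?, PySem.List.pyIdx?, PySem.Str.join,
        PySem.Chars.join_singleton]
  | [a, b], _ => simp [List.take]
  | a :: b :: c :: t, _ => simp

-- ===== VERDICT (by name: the statement is the Claim_ definition above) =====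

theorem group_params_spec : Claim_equal_group_params := by
  intro all_stats _hdom _hpre
  unfold Spec_group_params group_params group_params_alt
  -- rewrite A's loop to use B's key
  have hfold :
      all_stats.foldl
        (fun (g : PySem.Dict String (List (List (String × String)))) s =>
          g.modify (pvKeyA (pvNameOf s)) [] (· ++ [s])) PySem.Dict.empty
      = all_stats.foldl
        (fun (g : PySem.Dict String (List (List (String × String)))) s =>
          g.modify (pvKeyB s) [] (· ++ [s])) PySem.Dict.empty := by
    congr 1; funext g s; rw [key_eq]
  rw [hfold]
  set d := all_stats.foldl
      (fun (g : PySem.Dict String (List (List (String × String)))) s =>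
        g.modify (pvKeyB s) [] (· ++ [s])) PySem.Dict.empty with hd
  have hnodup : d.keys.Nodup := by
    rw [hd]
    exact PySem.Dict.nodup_keys_foldl_modify_key all_stats pvKeyB []
      (fun _ s => (· ++ [s])) PySem.Dict.empty (by simp [PySem.Dict.keys_empty])
  have hkeys : d.keys =
      all_stats.foldl (fun ks s => PySem.Set.add ks (pvKeyB s)) PySem.Set.empty := by
    rw [hd, PySem.Dict.keys_foldl_modify_key, PySem.Dict.keys_empty,
      ← PySem.Set.update_map_eq_foldl_add]
    rfl
  have hgetD : ∀ k, d.getD k [] = all_stats.filter (fun s => pvKeyB s == k) := by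
    intro k
    rw [hd, ← List.foldl_map (f := fun s => (pvKeyB s, s))
      (g := fun (g : PySem.Dict String (List (List (String × String)))) p =>
        g.modify p.1 [] (· ++ [p.2]))]
    rw [PySem.Dict.getD_foldl_modify_append]
    simp [PySem.Dict.getD_empty, List.filter_map, Function.comp_def]
  rw [PySem.Dict.items_eq_map_keys d hnodup [], hkeys.symm]
  exact List.map_congr_left (fun k _ => by rw [hgetD k])
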